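-- pv_equiv track=rewrite | github.com/delgermurun/CP | uva.onlinejudge/1061.py | get_parent_blood_types
-- ===== SOURCE A (Python) =====
-- R_COMBINATIONS = {
--     'AA': 'A',
--     'AB': 'AB',
--     'AO': 'A',
--     'BB': 'B',
--     'BO': 'B',
--     'OO': 'O',
-- }
--
-- A_COMBINATIONS = {
--     'A': set(('AA', 'AO')),
--     'B': set(('BB', 'BO')),
--     'AB': set(('AB',)),
--     'O': set(('OO',))
-- }
--
-- def sort(x):
--     if x == 'O':
--         return 1
--     elif x == 'AB':
--         return 2
--     elif x == 'B':
--         return 3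
--     elif x == 'A':
--         return 4
--
-- def get_parent_blood_types(p, ch):
--     rh = ['-', '+']
--     if p[-1] == '-' and ch[-1] == '+':
--         rh = ['+']
--
--     p = A_COMBINATIONS[p[:-1]]
--     ch = A_COMBINATIONS[ch[:-1]]
--
--     abo = set()
--     for ct in ch:
--         for pt in p:
--             if ct[0] in pt:
--                 for k, vt in R_COMBINATIONS.items():
--                     if ct[1] in k:
--                         abo.add(vt)
--
--             if ct[1] in pt:
--                 for k, vt in R_COMBINATIONS.items():
--                     if ct[0] in k:
--                         abo.add(vt)
--
--     return [a + r for a in sorted(abo, key=sort) for r in rh]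
-- ===== SOURCE B (Python) =====
-- A_COMBINATIONS = {
--     'A': set(('AA', 'AO')),
--     'B': set(('BB', 'BO')),
--     'AB': set(('AB',)),
--     'O': set(('OO',))
-- }
--
-- def get_parent_blood_types(p, ch):
--     rh = ['+'] if p[-1] == '-' and ch[-1] == '+' else ['-', '+']
--     pg = A_COMBINATIONS[p[:-1]]
--     cg = A_COMBINATIONS[ch[:-1]]
--     # enumerate candidate other-parent phenotypes directly, already in output order
--     abo = [q for q in ('O', 'AB', 'B', 'A')
--            if any((ct[0] in pt and ct[1] in ot) or (ct[1] in pt and ct[0] in ot)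
--                   for ct in cg for pt in pg for ot in A_COMBINATIONS[q])]
--     return [a + r for a in abo for r in rh]
-- ===== Notes on version B (the rewrite author's own statement) =====
-- stated objective: simpler
-- what changed: Instead of deriving needed alleles and collecting phenotypes via R_COMBINATIONS into a set that must then be sorted with a custom key, B enumerates the four candidate phenotypes already in output order and keeps each one iff some child genotype shares one allele with a p-genotype and the other with a candidate genotype; R_COMBINATIONS and the sort key disappear.
import Mathlib
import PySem

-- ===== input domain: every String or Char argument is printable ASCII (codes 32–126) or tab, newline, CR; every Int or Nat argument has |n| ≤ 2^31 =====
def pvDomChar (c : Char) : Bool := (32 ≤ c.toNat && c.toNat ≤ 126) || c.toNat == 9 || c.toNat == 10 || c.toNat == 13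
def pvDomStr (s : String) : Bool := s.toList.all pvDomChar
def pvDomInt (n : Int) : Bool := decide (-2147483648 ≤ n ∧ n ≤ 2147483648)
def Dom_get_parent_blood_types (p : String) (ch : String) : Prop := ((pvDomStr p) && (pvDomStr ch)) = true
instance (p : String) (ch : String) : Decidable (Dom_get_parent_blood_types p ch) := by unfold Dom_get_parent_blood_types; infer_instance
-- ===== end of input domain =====

-- B replaces A's needed-allele derivation (R_COMBINATIONS scan + custom-key sort of a set) by
-- enumerating the four candidate phenotypes in output order and testing allele sharing directly.

-- ===== PORT A =====
-- R_COMBINATIONS.items() in insertion order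
def pvRCombItems : List (String × String) :=
  [("AA", "A"), ("AB", "AB"), ("AO", "A"), ("BB", "B"), ("BO", "B"), ("OO", "O")]

def pvACombinations : PySem.Dict String (PySem.Set String) :=
  PySem.Dict.ofList
    [("A", PySem.Set.ofList ["AA", "AO"]), ("B", PySem.Set.ofList ["BB", "BO"]),
     ("AB", PySem.Set.ofList ["AB"]), ("O", PySem.Set.ofList ["OO"])]

-- Python's `sort`; final `else 0` is Python's implicit `return None`, unreachable on abo's elements
def pvSortKey (x : String) : Int :=
  if x == "O" then 1 else if x == "AB" then 2 else if x == "B" then 3 else if x == "A" then 4 else 0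

-- `ct[i] in pt`: ct[i] is a one-character string, membership is substring test (PySem.Str.isIn);
-- the `none` arm is Python's IndexError, unreachable since every genotype string has length 2
def pvCharIn (oc : Option Char) (s : String) : Bool :=
  match oc with
  | some c => PySem.Str.isIn (String.ofList [c]) s
  | none => false

-- the two nested `for` loops building the set `abo`
def pvAboA (pS chS : PySem.Set String) : PySem.Set String :=
  chS.foldl (fun abo ct =>
    pS.foldl (fun abo pt =>
      let abo :=
        if pvCharIn (PySem.Str.pyGet? ct 0) pt then
          pvRCombItems.foldl (fun abo kv =>
            if pvCharIn (PySem.Str.pyGet? ct 1) kv.1 then PySem.Set.add abo kv.2 else abo) abo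
        else abo
      if pvCharIn (PySem.Str.pyGet? ct 1) pt then
        pvRCombItems.foldl (fun abo kv =>
          if pvCharIn (PySem.Str.pyGet? ct 0) kv.1 then PySem.Set.add abo kv.2 else abo) abo
      else abo) abo) PySem.Set.empty

def get_parent_blood_types (p : String) (ch : String) : List String :=
  let rh : List String :=
    if PySem.Str.pyGet? p (-1) = some '-' ∧ PySem.Str.pyGet? ch (-1) = some '+'
    then ["+"] else ["-", "+"]
  -- A_COMBINATIONS[p[:-1]] / A_COMBINATIONS[ch[:-1]]; the `none` arms are KeyError, excluded by Pre_
  match pvACombinations.get? (PySem.Str.slice p none (some (-1))),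
        pvACombinations.get? (PySem.Str.slice ch none (some (-1))) with
  | some pS, some chS =>
      (PySem.List.sorted (pvAboA pS chS) pvSortKey false).flatMap
        (fun a => rh.map (fun r => PySem.Str.join "" [a, r]))  -- a + r
  | _, _ => []

-- ===== PORT B =====
-- Source B's own copy of the A_COMBINATIONS module constant
def pvBACombinations : PySem.Dict String (PySem.Set String) :=
  PySem.Dict.ofList
    [("A", PySem.Set.ofList ["AA", "AO"]), ("B", PySem.Set.ofList ["BB", "BO"]),
     ("AB", PySem.Set.ofList ["AB"]), ("O", PySem.Set.ofList ["OO"])]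

-- `ct[i] in s` for the one-character string ct[i] (substring test; `none` = IndexError, unreachable)
def pvBCharIn (oc : Option Char) (s : String) : Bool :=
  oc.elim false (fun c => PySem.Str.isIn (String.ofList [c]) s)

-- the `any(...)` generator of Source B
def pvBAccepts (pS chS oS : PySem.Set String) : Bool :=
  chS.any (fun ct => pS.any (fun pt => oS.any (fun ot =>
    (pvBCharIn (PySem.Str.pyGet? ct 0) pt && pvBCharIn (PySem.Str.pyGet? ct 1) ot) ||
    (pvBCharIn (PySem.Str.pyGet? ct 1) pt && pvBCharIn (PySem.Str.pyGet? ct 0) ot))))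

def get_parent_blood_types_alt (p : String) (ch : String) : List String :=
  let rh : List String :=
    if PySem.Str.pyGet? p (-1) = some '-' ∧ PySem.Str.pyGet? ch (-1) = some '+'
    then ["+"] else ["-", "+"]
  match pvBACombinations.get? (PySem.Str.slice p none (some (-1))) with
  | none => []  -- KeyError
  | some pS =>
    match pvBACombinations.get? (PySem.Str.slice ch none (some (-1))) with
    | none => []  -- KeyError
    | some chS =>
      let abo := ["O", "AB", "B", "A"].filter
        (fun q => pvBAccepts pS chS (pvBACombinations.getD q PySem.Set.empty))
      abo.flatMap (fun a => rh.map (fun r => PySem.Str.join "" [a, r]))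

-- ===== PRECONDITION & SPEC =====
-- Pre_ holds exactly when both A_COMBINATIONS lookups succeed (otherwise Python raises
-- KeyError, or IndexError on an empty argument); it is exactly where A returns.
def Pre_get_parent_blood_types (p : String) (ch : String) : Prop :=
  PySem.Str.slice p none (some (-1)) ∈ ["A", "B", "AB", "O"] ∧
  PySem.Str.slice ch none (some (-1)) ∈ ["A", "B", "AB", "O"]
instance (p : String) (ch : String) : Decidable (Pre_get_parent_blood_types p ch) := by
  unfold Pre_get_parent_blood_types; infer_instance

def pvWitness_get_parent_blood_types : String × String := ("A+", "O-")

def Spec_get_parent_blood_types (p : String) (ch : String) (out : List String) : Prop := out = get_parent_blood_types_alt p ch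
instance (p : String) (ch : String) (out : List String) : Decidable (Spec_get_parent_blood_types p ch out) := by unfold Spec_get_parent_blood_types; infer_instance

-- ===== CLAIM (what is proved, stated in full; the proofs are below) =====
def Claim_equal_get_parent_blood_types : Prop := ∀ (p : String) (ch : String), Dom_get_parent_blood_types p ch → Pre_get_parent_blood_types p ch → Spec_get_parent_blood_types p ch (get_parent_blood_types p ch)

-- ===== LEMMAS AND PROOFS =====

-- ===== VERDICT (by name: the statement is the Claim_ definition above) =====
theorem get_parent_blood_types_spec : Claim_equal_get_parent_blood_types := by
  intro p ch _ hpre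
  obtain ⟨hp, hc⟩ := hpre
  show get_parent_blood_types p ch = get_parent_blood_types_alt p ch
  by_cases hb : (PySem.Str.pyGet? p (-1) = some '-' ∧ PySem.Str.pyGet? ch (-1) = some '+')
  · simp only [get_parent_blood_types, get_parent_blood_types_alt, if_pos hb]
    generalize hsp : PySem.Str.slice p none (some (-1)) = sp at hp ⊢
    generalize hsc : PySem.Str.slice ch none (some (-1)) = sc at hc ⊢
    fin_cases hp <;> fin_cases hc <;> decide
  · simp only [get_parent_blood_types, get_parent_blood_types_alt, if_neg hb]
    generalize hsp : PySem.Str.slice p none (some (-1)) = sp at hp ⊢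
    generalize hsc : PySem.Str.slice ch none (some (-1)) = sc at hc ⊢
    fin_cases hp <;> fin_cases hc <;> decide
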